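-- pv_equiv track=rewrite | github.com/kirinnsan/checkio-training | GitHub/the-highest-building.py | highest_building
-- ===== SOURCE A (Python) =====
-- def highest_building(buildings):
--     buiiding_dict = {}
--     for building in buildings:
--         for i, cell in enumerate(building, 1):
--             if i not in buiiding_dict:
--                 buiiding_dict[i] = 0
--             if cell == 1:
--                 buiiding_dict[i] += 1
--
--     result = []
--     for k, v in buiiding_dict.items():
--         if not result or v > result[-1]:
--             result = [k, v]
--
--     return result
-- ===== SOURCE B (Python) =====
-- def highest_building(buildings):
--     width = 0
--     for b in buildings:
--         if len(b) > width:
--             width = len(b)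
--     best = []
--     for i in range(1, width + 1):
--         c = 0
--         for b in buildings:
--             if i <= len(b) and b[i - 1] == 1:
--                 c += 1
--         if not best or c > best[1]:
--             best = [i, c]
--     return best
-- ===== Notes on version B (the rewrite author's own statement) =====
-- stated objective: alternative
-- what changed: B iterates column-by-column (explicit width scan, then for each column index count the buildings whose cell is 1, keeping the first strictly-greater best), instead of A's row-by-row dict of per-column counters followed by a scan over dict items.
import Mathlib
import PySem

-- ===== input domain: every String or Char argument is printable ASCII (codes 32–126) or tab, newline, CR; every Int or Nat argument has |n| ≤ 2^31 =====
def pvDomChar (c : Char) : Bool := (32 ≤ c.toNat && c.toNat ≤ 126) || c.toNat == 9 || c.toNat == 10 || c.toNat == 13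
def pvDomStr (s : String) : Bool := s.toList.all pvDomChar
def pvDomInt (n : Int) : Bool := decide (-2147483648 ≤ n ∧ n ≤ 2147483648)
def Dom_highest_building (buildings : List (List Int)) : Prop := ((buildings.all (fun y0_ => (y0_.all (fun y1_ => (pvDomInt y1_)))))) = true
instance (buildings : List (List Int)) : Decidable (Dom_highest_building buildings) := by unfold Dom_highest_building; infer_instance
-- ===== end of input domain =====

-- B iterates column-by-column (explicit width scan, then a per-column count of 1-cells with a first-strictly-greater best) instead of A's row-wise dict of per-column counters; alternative decomposition, same return value.


-- ===== PORT A =====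
-- literal port of A: build a dict column-index → count over all buildings, then scan d.items keeping [k, v] when v > result[-1]
def highest_building (buildings : List (List Int)) : List Int :=
  let d := buildings.foldl
    (fun d building =>
      (PySem.List.enumerate building 1).foldl
        (fun d p =>
          let d := if d.contains p.1 then d else d.insert p.1 0
          if p.2 = 1 then d.insert p.1 (d.getD p.1 0 + 1) else d)
        d)
    PySem.Dict.empty
  d.items.foldl
    (fun result kv =>
      if result = [] ∨ kv.2 > PySem.List.pyGetD result (-1) 0 then [kv.1, kv.2] else result)
    []

-- ===== PORT B =====
-- literal port of B: explicit width scan, then for each column index count the 1-cells and keep the first strictly greater best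
def highest_building_alt (buildings : List (List Int)) : List Int :=
  let width := buildings.foldl (fun w b => if ((b.length : Int)) > w then (b.length : Int) else w) 0
  (PySem.List.pyRange 1 (width + 1) 1).foldl
    (fun best i =>
      let c := buildings.foldl
        (fun c b => if i ≤ (b.length : Int) ∧ PySem.List.pyGetD b (i - 1) 0 = 1 then c + 1 else c)
        (0 : Int)
      if best = [] ∨ c > PySem.List.pyGetD best 1 0 then [i, c] else best)
    []

-- ===== PRECONDITION & SPEC =====
def Spec_highest_building (buildings : List (List Int)) (out : List Int) : Prop := out = highest_building_alt buildings
instance (buildings : List (List Int)) (out : List Int) : Decidable (Spec_highest_building buildings out) := by unfold Spec_highest_building; infer_instance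

-- ===== CLAIM (what is proved, stated in full; the proofs are below) =====
def Claim_equal_highest_building : Prop := ∀ (buildings : List (List Int)), Dom_highest_building buildings → Spec_highest_building buildings (highest_building buildings)

-- ===== LEMMAS AND PROOFS =====

theorem keys_enum (vals : List Int) (s : Int) :
    (PySem.Dict.mk (PySem.List.enumerate vals s)).keys = PySem.List.pyRange s (s + vals.length) 1 := by
  simp [PySem.Dict.keys_mk, PySem.List.map_fst_enumerate]

theorem contains_enum (vals : List Int) (s k : Int) :
    (PySem.Dict.mk (PySem.List.enumerate vals s)).contains k = decide (s ≤ k ∧ k < s + vals.length) := by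
  rw [PySem.Dict.contains_eq_decide_mem_keys, keys_enum]
  simp [PySem.List.mem_pyRange_one]

theorem get?_enum (vs ws : List Int) (w : Int) (s : Int) :
    (PySem.Dict.mk (PySem.List.enumerate (vs ++ w :: ws) s)).get? (s + vs.length) = some w := by
  induction vs generalizing s with
  | nil => simp [PySem.List.enumerate_cons, PySem.Dict.get?_mk_cons]
  | cons v vs ih =>
    rw [List.cons_append, PySem.List.enumerate_cons, PySem.Dict.get?_mk_cons]
    have h1 : (s == s + ((v :: vs).length : Int)) = false := by
      simp only [beq_eq_false_iff_ne, ne_eq, List.length_cons]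
      push_cast; omega
    rw [h1]
    have := ih (s + 1)
    rw [show s + ((v :: vs).length : Int) = (s+1) + (vs.length : Int) by simp; omega]
    simpa using this

theorem map_replace_enum (ws : List Int) (t k x : Int) (h : k < t ∨ t + ws.length ≤ k) :
    (PySem.List.enumerate ws t).map (fun p => if p.1 == k then (k, x) else p)
      = PySem.List.enumerate ws t := by
  induction ws generalizing t with
  | nil => simp
  | cons w ws ih =>
    rw [PySem.List.enumerate_cons, List.map_cons]
    have h1 : (t == k) = false := by
      simp only [beq_eq_false_iff_ne, ne_eq]
      simp only [List.length_cons] at h; push_cast at h; omega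
    simp only [h1, Bool.false_eq_true, if_false]
    rw [ih (t + 1) (by simp only [List.length_cons] at h; push_cast at h ⊢; omega)]

theorem insert_mid (vs ws : List Int) (w x s : Int) :
    (PySem.Dict.mk (PySem.List.enumerate (vs ++ w :: ws) s)).insert (s + vs.length) x
      = PySem.Dict.mk (PySem.List.enumerate (vs ++ x :: ws) s) := by
  have hc : (PySem.Dict.mk (PySem.List.enumerate (vs ++ w :: ws) s)).contains (s + vs.length) = true := by
    rw [contains_enum]; simp [List.length_append]
  have hitems := PySem.Dict.items_insert_of_contains (d := PySem.Dict.mk (PySem.List.enumerate (vs ++ w :: ws) s)) (k := s + vs.length) (v := x) hc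
  have : (PySem.Dict.mk (PySem.List.enumerate (vs ++ w :: ws) s)).items = PySem.List.enumerate (vs ++ w :: ws) s := rfl
  rw [this] at hitems
  have hmap : (PySem.List.enumerate (vs ++ w :: ws) s).map
      (fun p => if p.1 == s + vs.length then (s + vs.length, x) else p)
      = PySem.List.enumerate (vs ++ x :: ws) s := by
    rw [PySem.List.enumerate_append, PySem.List.enumerate_append, List.map_append,
        PySem.List.enumerate_cons, PySem.List.enumerate_cons, List.map_cons]
    rw [map_replace_enum vs s (s + vs.length) x (by right; omega)]
    simp only [BEq.rfl, if_true]
    rw [map_replace_enum ws (s + vs.length + 1) (s + vs.length) x (by left; omega)]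
  have : (PySem.Dict.mk (PySem.List.enumerate (vs ++ w :: ws) s)).insert (s + vs.length) x
      = PySem.Dict.mk ((PySem.Dict.mk (PySem.List.enumerate (vs ++ w :: ws) s)).insert (s + vs.length) x).items := rfl
  rw [this, hitems, hmap]

theorem insert_append (vals : List Int) (x s : Int) :
    (PySem.Dict.mk (PySem.List.enumerate vals s)).insert (s + vals.length) x
      = PySem.Dict.mk (PySem.List.enumerate (vals ++ [x]) s) := by
  have hc : (PySem.Dict.mk (PySem.List.enumerate vals s)).contains (s + vals.length) = false := by
    rw [contains_enum]; simp
  have hitems := PySem.Dict.items_insert_of_not_contains (d := PySem.Dict.mk (PySem.List.enumerate vals s)) (k := s + vals.length) (v := x) hc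
  have h2 : (PySem.Dict.mk (PySem.List.enumerate vals s)).insert (s + vals.length) x
      = PySem.Dict.mk ((PySem.Dict.mk (PySem.List.enumerate vals s)).insert (s + vals.length) x).items := rfl
  rw [h2, hitems]
  have : (PySem.Dict.mk (PySem.List.enumerate vals s)).items = PySem.List.enumerate vals s := rfl
  rw [this, PySem.List.enumerate_append]
  simp [PySem.List.enumerate_cons]

def pvCombine : List Int → List Int → List Int
  | vals, [] => vals
  | [], c :: cs => (if c = 1 then (1 : Int) else 0) :: pvCombine [] cs
  | v :: vs, c :: cs => (if c = 1 then v + 1 else v) :: pvCombine vs cs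

theorem getD_enum (vs ws : List Int) (w s : Int) :
    (PySem.Dict.mk (PySem.List.enumerate (vs ++ w :: ws) s)).getD (s + vs.length) 0 = w := by
  rw [PySem.Dict.getD_eq_get?_getD, get?_enum]; rfl

theorem innerA (b : List Int) : ∀ (vs ws : List Int),
    (PySem.List.enumerate b ((vs.length : Int) + 1)).foldl
      (fun d p =>
        let d := if d.contains p.1 then d else d.insert p.1 0
        if p.2 = 1 then d.insert p.1 (d.getD p.1 0 + 1) else d)
      (PySem.Dict.mk (PySem.List.enumerate (vs ++ ws) 1))
    = PySem.Dict.mk (PySem.List.enumerate (vs ++ pvCombine ws b) 1) := by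
  induction b with
  | nil => intro vs ws; cases ws <;> simp [pvCombine]
  | cons c cs ih =>
    intro vs ws
    rw [PySem.List.enumerate_cons, List.foldl_cons]
    have key : ((vs.length : Int) + 1) = 1 + (vs.length : Int) := by omega
    cases ws with
    | nil =>
      have hc : (PySem.Dict.mk (PySem.List.enumerate (vs ++ []) 1)).contains ((vs.length : Int) + 1) = false := by
        rw [contains_enum]; simp; omega
      simp only [hc, Bool.false_eq_true, if_false]
      rw [key, show (PySem.List.enumerate (vs ++ []) 1) = PySem.List.enumerate vs 1 by simp]
      rw [insert_append vs 0 1]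
      by_cases hcell : c = 1
      · simp only [hcell, if_true]
        rw [getD_enum vs [] 0 1, show (0 : Int) + 1 = 1 by norm_num, insert_mid vs [] 0 1 1]
        have h2 := ih (vs ++ [1]) []
        rw [List.append_assoc, List.append_assoc] at h2
        simp only [List.append_nil] at h2
        simp only [List.length_append, List.length_cons, List.length_nil] at h2
        push_cast at h2
        rw [show (1 : Int) + (vs.length : Int) + 1 = (vs.length : Int) + 1 + 1 by omega]
        rw [h2]
        simp [pvCombine]
      · simp only [hcell, if_false]
        have h2 := ih (vs ++ [0]) []
        rw [List.append_assoc, List.append_assoc] at h2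
        simp only [List.append_nil] at h2
        simp only [List.length_append, List.length_cons, List.length_nil] at h2
        push_cast at h2
        rw [show (1 : Int) + (vs.length : Int) + 1 = (vs.length : Int) + 1 + 1 by omega]
        rw [h2]
        simp [pvCombine, hcell]
    | cons w ws' =>
      have hc : (PySem.Dict.mk (PySem.List.enumerate (vs ++ w :: ws') 1)).contains ((vs.length : Int) + 1) = true := by
        rw [contains_enum]; simp [List.length_append]; omega
      simp only [hc, if_true]
      rw [key]
      by_cases hcell : c = 1
      · simp only [hcell, if_true]
        rw [getD_enum vs ws' w 1, insert_mid vs ws' w (w + 1) 1]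
        have h2 := ih (vs ++ [w + 1]) ws'
        rw [List.append_assoc, List.append_assoc] at h2
        simp only [List.length_append, List.length_cons, List.length_nil] at h2
        push_cast at h2
        rw [show (1 : Int) + (vs.length : Int) + 1 = (vs.length : Int) + 1 + 1 by omega]
        simp only [List.cons_append, List.nil_append] at h2
        rw [h2]
        simp [pvCombine]
      · simp only [hcell, if_false]
        have h2 := ih (vs ++ [w]) ws'
        rw [List.append_assoc, List.append_assoc] at h2
        simp only [List.length_append, List.length_cons, List.length_nil] at h2
        push_cast at h2
        rw [show (1 : Int) + (vs.length : Int) + 1 = (vs.length : Int) + 1 + 1 by omega]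
        simp only [List.cons_append, List.nil_append] at h2
        rw [h2]
        simp [pvCombine, hcell]

theorem outerA (bs : List (List Int)) : ∀ (vals : List Int),
    bs.foldl
      (fun d building =>
        (PySem.List.enumerate building 1).foldl
          (fun d p =>
            let d := if d.contains p.1 then d else d.insert p.1 0
            if p.2 = 1 then d.insert p.1 (d.getD p.1 0 + 1) else d)
          d)
      (PySem.Dict.mk (PySem.List.enumerate vals 1))
    = PySem.Dict.mk (PySem.List.enumerate (bs.foldl pvCombine vals) 1) := by
  induction bs with
  | nil => intro vals; rfl
  | cons b bs ih =>
    intro vals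
    rw [List.foldl_cons, List.foldl_cons]
    have h := innerA b [] vals
    simp only [List.nil_append, List.length_nil, Nat.cast_zero, zero_add] at h
    rw [h, ih]

theorem combine_getD (b : List Int) : ∀ (vals : List Int) (j : Nat),
    (pvCombine vals b).getD j 0
      = vals.getD j 0 + (if (j : Int) + 1 ≤ (b.length : Int) ∧ b.getD j 0 = 1 then 1 else 0) := by
  induction b with
  | nil =>
    intro vals j
    have : ¬ ((j : Int) + 1 ≤ (([] : List Int).length : Int) ∧ ([] : List Int).getD j 0 = 1) := by
      simp
    rw [if_neg this]; simp [pvCombine]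
  | cons c cs ih =>
    intro vals j
    cases vals with
    | nil =>
      cases j with
      | zero => simp [pvCombine]
      | succ j =>
        simp only [pvCombine, List.getD_cons_succ]
        rw [ih [] j]
        simp only [List.getD_nil, List.length_cons]
        congr 1
        apply if_congr _ rfl rfl
        constructor <;> (rintro ⟨h1, h2⟩; exact ⟨by push_cast [List.length_cons] at h1 ⊢; omega, h2⟩)
    | cons v vs =>
      cases j with
      | zero => simp [pvCombine]; split_ifs <;> simp_all
      | succ j =>
        simp only [pvCombine, List.getD_cons_succ]
        rw [ih vs j]
        congr 1
        apply if_congr _ rfl rfl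
        constructor <;> (rintro ⟨h1, h2⟩; exact ⟨by push_cast [List.length_cons] at h1 ⊢; omega, h2⟩)

theorem countFold (bs : List (List Int)) : ∀ (vals : List Int) (j : Nat),
    (bs.foldl pvCombine vals).getD j 0
      = bs.foldl (fun c b => if (j : Int) + 1 ≤ (b.length : Int) ∧ b.getD j 0 = 1 then c + 1 else c)
          (vals.getD j 0) := by
  induction bs with
  | nil => intro vals j; rfl
  | cons b bs ih =>
    intro vals j
    rw [List.foldl_cons, List.foldl_cons, ih (pvCombine vals b) j, combine_getD b vals j]
    by_cases h : (j : Int) + 1 ≤ (b.length : Int) ∧ b.getD j 0 = 1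
    · rw [if_pos h, if_pos h]
    · rw [if_neg h, if_neg h, add_zero]

theorem lenCombine (b : List Int) : ∀ (vals : List Int),
    (pvCombine vals b).length = max vals.length b.length := by
  induction b with
  | nil => intro vals; cases vals <;> simp [pvCombine]
  | cons c cs ih =>
    intro vals
    cases vals <;> simp [pvCombine, ih]

theorem widthFold (bs : List (List Int)) : ∀ (vals : List Int),
    ((bs.foldl pvCombine vals).length : Int)
      = bs.foldl (fun w b => if ((b.length : Int)) > w then (b.length : Int) else w) (vals.length : Int) := by
  induction bs with
  | nil => intro vals; rfl
  | cons b bs ih =>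
    intro vals
    rw [List.foldl_cons, List.foldl_cons, ih (pvCombine vals b)]
    congr 1
    rw [lenCombine]
    split_ifs <;> push_cast <;> omega

theorem mem_enum (vals : List Int) : ∀ (s : Int) (p : Int × Int), p ∈ PySem.List.enumerate vals s →
    ∃ j : Nat, j < vals.length ∧ p = (s + j, vals.getD j 0) := by
  induction vals with
  | nil => intro s p h; simp [PySem.List.enumerate_nil] at h
  | cons v vs ih =>
    intro s p h
    rw [PySem.List.enumerate_cons, List.mem_cons] at h
    rcases h with h | h
    · exact ⟨0, by simp, by simp [h]⟩
    · obtain ⟨j, hj, hp⟩ := ih (s + 1) p h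
      refine ⟨j + 1, by simpa using hj, ?_⟩
      rw [hp]
      congr 1
      push_cast
      omega

theorem getD_pair_neg_one (k v : Int) : PySem.List.pyGetD [k, v] (-1) 0 = v := by
  simp [pysem]

theorem getD_pair_one (k v : Int) : PySem.List.pyGetD [k, v] 1 0 = v := by
  simp [pysem]

theorem scan_eq (l : List (Int × Int)) (c : Int → Int) : ∀ (r : List Int),
    (∀ p ∈ l, c p.1 = p.2) → (r = [] ∨ ∃ k v, r = [k, v]) →
    l.foldl (fun result kv =>
        if result = [] ∨ kv.2 > PySem.List.pyGetD result (-1) 0 then [kv.1, kv.2] else result) r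
    = (l.map Prod.fst).foldl (fun best i =>
        if best = [] ∨ c i > PySem.List.pyGetD best 1 0 then [i, c i] else best) r := by
  induction l with
  | nil => intro r _ _; rfl
  | cons p l ih =>
    intro r hc hr
    rw [List.map_cons, List.foldl_cons, List.foldl_cons]
    have hcp : c p.1 = p.2 := hc p (List.mem_cons_self)
    have hguard : (r = [] ∨ p.2 > PySem.List.pyGetD r (-1) 0) ↔ (r = [] ∨ c p.1 > PySem.List.pyGetD r 1 0) := by
      rcases hr with h | ⟨k, v, h⟩ <;> subst h
      · simp
      · simp [getD_pair_neg_one, getD_pair_one, hcp]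
    have htail : ∀ q ∈ l, c q.1 = q.2 := fun q hq => hc q (List.mem_cons_of_mem p hq)
    by_cases hg : r = [] ∨ p.2 > PySem.List.pyGetD r (-1) 0
    · rw [if_pos hg, if_pos (hguard.mp hg), hcp]
      exact ih [p.1, p.2] htail (Or.inr ⟨p.1, p.2, rfl⟩)
    · rw [if_neg hg, if_neg (fun h => hg (hguard.mpr h))]
      exact ih r htail hr

theorem pv_main (buildings : List (List Int)) :
    highest_building buildings = highest_building_alt buildings := by
  simp only [highest_building, highest_building_alt]
  have hdict : buildings.foldl
      (fun d building =>
        (PySem.List.enumerate building 1).foldl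
          (fun d p =>
            let d := if d.contains p.1 then d else d.insert p.1 0
            if p.2 = 1 then d.insert p.1 (d.getD p.1 0 + 1) else d)
          d)
      PySem.Dict.empty
      = PySem.Dict.mk (PySem.List.enumerate (buildings.foldl pvCombine []) 1) := outerA buildings []
  rw [hdict]
  have hwidth : buildings.foldl (fun w b => if ((b.length : Int)) > w then (b.length : Int) else w) 0
      = ((buildings.foldl pvCombine []).length : Int) := (widthFold buildings []).symm
  rw [hwidth]
  set V := buildings.foldl pvCombine [] with hV
  have hitems : (PySem.Dict.mk (PySem.List.enumerate V 1)).items = PySem.List.enumerate V 1 := rfl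
  rw [hitems]
  have hrange : PySem.List.pyRange 1 ((V.length : Int) + 1) 1 = (PySem.List.enumerate V 1).map Prod.fst := by
    rw [PySem.List.map_fst_enumerate, show (1 : Int) + (V.length : Int) = (V.length : Int) + 1 by omega]
  rw [hrange]
  apply scan_eq
  · intro p hp
    obtain ⟨j, hj, hpj⟩ := mem_enum V 1 p hp
    rw [hpj]
    have hbody : (fun (cacc : Int) (b : List Int) =>
          if (1 : Int) + (j : Nat) ≤ (b.length : Int) ∧ PySem.List.pyGetD b ((1 : Int) + (j : Nat) - 1) 0 = 1
          then cacc + 1 else cacc)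
        = (fun (cacc : Int) (b : List Int) =>
          if ((j : Nat) : Int) + 1 ≤ (b.length : Int) ∧ b.getD j 0 = 1 then cacc + 1 else cacc) := by
      funext cacc b
      apply if_congr _ rfl rfl
      have hidx : (1 : Int) + (j : Nat) - 1 = ((j : Nat) : Int) := by omega
      rw [hidx, PySem.List.pyGetD_natCast]
      constructor <;> (rintro ⟨h1, h2⟩; exact ⟨by omega, h2⟩)
    show buildings.foldl _ 0 = ((1 : Int) + (j : Nat), V.getD j 0).2
    rw [hbody]
    have := countFold buildings [] j
    simp only [List.getD_nil] at this
    rw [← hV] at this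
    rw [← this]
  · exact Or.inl rfl

-- ===== VERDICT (by name: the statement is the Claim_ definition above) =====
theorem highest_building_spec : Claim_equal_highest_building := by
  intro buildings _
  unfold Spec_highest_building
  exact pv_main buildings
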